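-- pv_equiv track=rewrite | github.com/pifroggi/vs_undistort | vs_undistort/TMT_dynamic_1st_stage.py | split_to_patches
-- ===== SOURCE A (Python) =====
-- def split_to_patches(h, w, s):
--     nh = h // s + (1 if h % s != 0 else 0)
--     nw = w // s + (1 if w % s != 0 else 0)
--     ol_h = int((nh * s - h) / (nh - 1)) if nh > 1 else 0
--     ol_w = int((nw * s - w) / (nw - 1)) if nw > 1 else 0
--     hpos, wpos = [0], [0]
--     for i in range(1, nh):
--         hpos.append(min(hpos[-1] + s - ol_h, h - s))
--     for i in range(1, nw):
--         wpos.append(min(wpos[-1] + s - ol_w, w - s))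
--     return hpos, wpos
-- ===== SOURCE B (Python) =====
-- def _axis(d, s):
--     n = -(-d // s)  # ceil division
--     if n <= 1:
--         return [0]
--     step = s - (n * s - d) // (n - 1)
--     return [min(i * step, d - s) for i in range(n)]
--
-- def split_to_patches(h, w, s):
--     return _axis(h, s), _axis(w, s)
-- ===== Notes on version B (the rewrite author's own statement) =====
-- stated objective: simpler
-- what changed: A's per-dimension running-accumulator loops (each position = previous + step, clamped) are replaced by a single shared helper that computes the patch count by ceiling division -(-d//s), returns [0] for a single patch, and otherwise builds each position independently from its index as min(i*step, d-s); valid because for a positive patch size the step is non-negative, so the clamp is monotone and sticks.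
-- outside the precondition, e.g. on split_to_patches(3, 3, 0): A raises ZeroDivisionError, B raises ZeroDivisionError; on split_to_patches(-5, 4, -2): A returns ([0, -3, -5], [0]), B returns ([-3, -3, -3], [0])
import Mathlib
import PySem

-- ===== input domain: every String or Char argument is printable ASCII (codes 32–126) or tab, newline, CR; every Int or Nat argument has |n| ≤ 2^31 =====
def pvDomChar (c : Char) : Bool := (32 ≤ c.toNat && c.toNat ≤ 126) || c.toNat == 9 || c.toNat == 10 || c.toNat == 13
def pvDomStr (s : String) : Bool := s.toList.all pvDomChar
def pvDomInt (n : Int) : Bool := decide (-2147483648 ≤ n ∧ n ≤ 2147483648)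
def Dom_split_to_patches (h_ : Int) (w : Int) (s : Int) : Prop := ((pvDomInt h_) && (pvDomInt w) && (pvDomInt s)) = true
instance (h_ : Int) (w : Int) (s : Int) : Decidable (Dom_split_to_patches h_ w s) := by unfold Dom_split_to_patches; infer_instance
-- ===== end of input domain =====

-- B replaces A's two clamped running-sum loops by one shared per-axis helper: ceiling-division
-- patch count, an explicit single-patch case, and an index-wise closed form (simpler decomposition; same cost).

-- ===== PORT A =====
-- int(x / y) is float true division truncated toward zero; on Dom the operands are ≤ 2^31+1
-- in magnitude, where it is exact truncating integer division: PySem.Int.truncdiv (|a|,|b| < 2^53).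
def split_to_patches (h_ : Int) (w : Int) (s : Int) : List Int × List Int :=
  let nh := PySem.Int.floordiv h_ s + (if PySem.Int.mod h_ s ≠ 0 then 1 else 0)
  let nw := PySem.Int.floordiv w s + (if PySem.Int.mod w s ≠ 0 then 1 else 0)
  let ol_h := if nh > 1 then PySem.Int.truncdiv (nh * s - h_) (nh - 1) else 0
  let ol_w := if nw > 1 then PySem.Int.truncdiv (nw * s - w) (nw - 1) else 0
  let hpos := (PySem.List.pyRange 1 nh 1).foldl
    (fun acc _ => acc ++ [min (acc.getLast! + s - ol_h) (h_ - s)]) [0]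
  let wpos := (PySem.List.pyRange 1 nw 1).foldl
    (fun acc _ => acc ++ [min (acc.getLast! + s - ol_w) (w - s)]) [0]
  (hpos, wpos)

-- ===== PORT B =====
def splitAxis (d : Int) (s : Int) : List Int :=
  let n := -(PySem.Int.floordiv (-d) s)
  if n ≤ 1 then [0]
  else
    let step := s - PySem.Int.floordiv (n * s - d) (n - 1)
    (PySem.List.pyRange 0 n 1).map (fun i => min (i * step) (d - s))

def split_to_patches_alt (h_ : Int) (w : Int) (s : Int) : List Int × List Int :=
  (splitAxis h_ s, splitAxis w s)

-- ===== PRECONDITION & SPEC =====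
-- Pre_ excludes s = 0, where A raises ZeroDivisionError, and restricts to the natural domain
-- of a positive patch size s > 0 (for s < 0 A's clamped accumulator produces accidental values
-- that B does not reproduce).
def Pre_split_to_patches (h_ : Int) (w : Int) (s : Int) : Prop := 0 < s
instance (h_ : Int) (w : Int) (s : Int) : Decidable (Pre_split_to_patches h_ w s) := by unfold Pre_split_to_patches; infer_instance
def pvWitness_split_to_patches : Int × Int × Int := (500, 700, 256)
def Spec_split_to_patches (h_ : Int) (w : Int) (s : Int) (out : List Int × List Int) : Prop := out = split_to_patches_alt h_ w s
instance (h_ : Int) (w : Int) (s : Int) (out : List Int × List Int) : Decidable (Spec_split_to_patches h_ w s out) := by unfold Spec_split_to_patches; infer_instance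

-- ===== CLAIM (what is proved, stated in full; the proofs are below) =====
def Claim_equal_split_to_patches : Prop := ∀ (h_ : Int) (w : Int) (s : Int), Dom_split_to_patches h_ w s → Pre_split_to_patches h_ w s → Spec_split_to_patches h_ w s (split_to_patches h_ w s)

-- ===== LEMMAS AND PROOFS =====

-- last element of the closed-form list
lemma lastClosed (step c : Int) (k : Nat) :
    (0 :: (PySem.List.pyRange 1 (1 + (k : Int)) 1).map (fun i => min (i * step) c)).getLast!
      = if k = 0 then 0 else min ((k : Int) * step) c := by
  cases k with
  | zero => rw [Nat.cast_zero, add_zero, PySem.List.pyRange_one_eq_nil (le_refl 1)]; rfl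
  | succ k =>
    have h1 : (1 : Int) + (k + 1 : Nat) = (1 + (k : Int)) + 1 := by push_cast; ring
    have h2 : ((k + 1 : Nat) : Int) = 1 + (k : Int) := by push_cast; ring
    rw [h1, PySem.List.pyRange_one_succ_right (by omega), List.map_append]
    simp only [List.map_cons, List.map_nil]
    rw [← List.cons_append, List.getLast!_eq_getLast?_getD, List.getLast?_concat]
    rw [if_neg (Nat.succ_ne_zero k), h2]
    rfl

-- A's clamped accumulator loop equals the index-wise closed form when the step is non-negative
lemma loopClosed (step c : Int) (hstep : 0 ≤ step) (k : Nat) :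
    (PySem.List.pyRange 1 (1 + (k : Int)) 1).foldl
        (fun acc _ => acc ++ [min (acc.getLast! + step) c]) [0]
      = 0 :: (PySem.List.pyRange 1 (1 + (k : Int)) 1).map (fun i => min (i * step) c) := by
  induction k with
  | zero => rw [Nat.cast_zero, add_zero, PySem.List.pyRange_one_eq_nil (le_refl 1)]; rfl
  | succ k ih =>
    have h1 : (1 : Int) + (k + 1 : Nat) = (1 + (k : Int)) + 1 := by push_cast; ring
    rw [h1, PySem.List.pyRange_one_succ_right (by omega)]
    rw [List.foldl_append, ih, List.map_append]
    have hl := lastClosed step c k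
    simp only [List.foldl_cons, List.foldl_nil, List.map_cons, List.map_nil]
    rw [hl]
    by_cases hk : k = 0
    · subst hk
      simp only [if_true, Nat.cast_zero, add_zero, List.cons_append]
      rw [zero_add, one_mul]
    · simp only [if_neg hk]
      have hmin : min (min ((k : Int) * step) c + step) c = min ((1 + (k : Int)) * step) c := by
        have he : (1 + (k : Int)) * step = (k : Int) * step + step := by ring
        rw [he]; omega
      rw [hmin]
      simp only [List.cons_append]

-- for s > 0, B's ceiling division agrees with A's floordiv-plus-remainder patch count
lemma ceilEq (d s : Int) (hs : 0 < s) :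
    -(PySem.Int.floordiv (-d) s)
      = PySem.Int.floordiv d s + (if PySem.Int.mod d s ≠ 0 then 1 else 0) := by
  have hqm := PySem.Int.floordiv_mul_add_mod d s
  have hm0 := PySem.Int.mod_nonneg d hs
  have hmlt := PySem.Int.mod_lt d hs
  set q := PySem.Int.floordiv d s with hq
  set m := PySem.Int.mod d s with hm
  rw [PySem.Int.neg_floordiv_neg_eq_iff_of_pos hs]
  by_cases hz : m = 0
  · simp only [hz, ne_eq, not_true_eq_false, if_false, add_zero]
    have hr : (q - 1) * s = q * s - s := by ring
    constructor
    · linarith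
    · linarith
  · simp only [ne_eq, hz, not_false_eq_true, if_true]
    have hr : (q + 1 - 1) * s = q * s := by ring
    have hr2 : (q + 1) * s = q * s + s := by ring
    constructor
    · have hm' : 0 < m := lt_of_le_of_ne hm0 (Ne.symm hz)
      linarith
    · linarith

-- one axis: A's accumulator loop equals B's helper, for s > 0
lemma axisEq (d s : Int) (hs : 0 < s) :
    (let n := PySem.Int.floordiv d s + (if PySem.Int.mod d s ≠ 0 then 1 else 0)
     let ol := if n > 1 then PySem.Int.truncdiv (n * s - d) (n - 1) else 0
     (PySem.List.pyRange 1 n 1).foldl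
        (fun acc _ => acc ++ [min (acc.getLast! + s - ol) (d - s)]) [0])
      = splitAxis d s := by
  have hqm := PySem.Int.floordiv_mul_add_mod d s
  have hm0 := PySem.Int.mod_nonneg d hs
  have hmlt := PySem.Int.mod_lt d hs
  set q := PySem.Int.floordiv d s with hq
  set m := PySem.Int.mod d s with hm
  set n := q + (if m ≠ 0 then 1 else 0) with hn
  unfold splitAxis
  rw [ceilEq d s hs, ← hq, ← hm, ← hn]
  by_cases h1 : n ≤ 1
  · -- single patch: A's loop body never runs
    simp only [if_pos h1]
    rw [PySem.List.pyRange_one_eq_nil h1]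
    rfl
  · -- multiple patches
    have hn1 : 1 < n := by omega
    simp only [if_neg h1, if_pos hn1]
    have hnum : 0 ≤ n * s - d ∧ n * s - d < s := by
      by_cases hz : m = 0
      · have he : n = q := by simp [hn, hz]
        have hr : n * s - d = -m := by rw [he, ← hqm]; ring
        constructor
        · omega
        · omega
      · have he : n = q + 1 := by simp [hn, hz]
        have hr : n * s - d = s - m := by rw [he, ← hqm]; ring
        constructor
        · omega
        · have hm' : 0 < m := lt_of_le_of_ne hm0 (Ne.symm hz)
          omega
    have hds : 0 ≤ d - s := by
      by_cases hz : m = 0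
      · have he : n = q := by simp [hn, hz]
        have hq2 : 2 ≤ q := by omega
        nlinarith
      · have he : n = q + 1 := by simp [hn, hz]
        have hq1 : 1 ≤ q := by omega
        nlinarith
    rw [show PySem.Int.truncdiv (n * s - d) (n - 1)
        = PySem.Int.floordiv (n * s - d) (n - 1) by
      rw [PySem.Int.floordiv_eq_ediv_of_pos (show (0:Int) < n - 1 by omega)]
      exact Int.tdiv_eq_ediv_of_nonneg hnum.1]
    set fd := PySem.Int.floordiv (n * s - d) (n - 1) with hfd
    have hstep : 0 ≤ s - fd := by
      rw [hfd, PySem.Int.floordiv_eq_ediv_of_pos (show (0:Int) < n - 1 by omega)]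
      have hle : (n * s - d) / (n - 1) ≤ n * s - d := Int.ediv_le_self _ hnum.1
      omega
    have hfun : (fun (acc : List Int) (_ : Int) =>
          acc ++ [min (acc.getLast! + s - fd) (d - s)])
        = (fun (acc : List Int) (_ : Int) =>
          acc ++ [min (acc.getLast! + (s - fd)) (d - s)]) := by
      funext acc i
      rw [add_sub_assoc]
    rw [hfun]
    have hk : n = 1 + ((n - 1).toNat : Int) := by omega
    rw [hk, loopClosed (s - fd) (d - s) hstep (n - 1).toNat]
    rw [PySem.List.pyRange_one_cons (show (0:Int) < 1 + ((n - 1).toNat : Int) by omega)]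
    simp only [List.map_cons, zero_add, zero_mul]
    rw [min_eq_left hds]

-- ===== VERDICT (by name: the statement is the Claim_ definition above) =====
theorem split_to_patches_spec : Claim_equal_split_to_patches := by
  intro h_ w s _ hpre
  unfold Spec_split_to_patches split_to_patches split_to_patches_alt
  exact Prod.ext (axisEq h_ s hpre) (axisEq w s hpre)
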